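-- pv_equiv track=rewrite | github.com/lazymingg/GemHunter | main.py | get_grid_result
-- ===== SOURCE A (Python) =====
-- from typing import List, Tuple, Set
-- from copy import deepcopy
--
-- def convert_int_to_pos(num: int, grid: List[List[str]]) -> Tuple[int, int]:
--     num = abs(num) - 1
--     x = num // len(grid[0])
--     y = num % len(grid[0])
--     return (x, y)
--
-- def get_grid_result(grid: List[List[str]], result: List[int]) -> List[List[str]]:
--     new_grid = deepcopy(grid)
--     for num in result:
--         temp = 'T' if num > 0 else 'G'
--         x, y = convert_int_to_pos(num, grid)
--         if new_grid[x][y] == '_':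
--             new_grid[x][y] = temp
--     return new_grid
-- ===== SOURCE B (Python) =====
-- def get_grid_result(grid, result):
--     # Walk the hints back-to-front and overwrite: the last write for a cell is then
--     # the earliest hint in result, so the guard can test the original grid directly
--     # instead of tracking the evolving copy.
--     new_grid = [list(row) for row in grid]
--     for num in reversed(result):
--         x, y = divmod(abs(num) - 1, len(grid[0]))
--         if grid[x][y] == '_':
--             new_grid[x][y] = 'T' if num > 0 else 'G'
--     return new_grid
-- ===== Notes on version B (the rewrite author's own statement) =====
-- stated objective: alternative
-- what changed: A scans result forward, skipping cells already filled in the mutating deepcopy; B scans result backward and overwrites unconditionally, so the first-wins rule falls out of write order and the guard reads the untouched original grid. Pre_ excludes only inputs on which A raises (empty grid or first row with a nonempty result, or a computed index out of range).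
import Mathlib
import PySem

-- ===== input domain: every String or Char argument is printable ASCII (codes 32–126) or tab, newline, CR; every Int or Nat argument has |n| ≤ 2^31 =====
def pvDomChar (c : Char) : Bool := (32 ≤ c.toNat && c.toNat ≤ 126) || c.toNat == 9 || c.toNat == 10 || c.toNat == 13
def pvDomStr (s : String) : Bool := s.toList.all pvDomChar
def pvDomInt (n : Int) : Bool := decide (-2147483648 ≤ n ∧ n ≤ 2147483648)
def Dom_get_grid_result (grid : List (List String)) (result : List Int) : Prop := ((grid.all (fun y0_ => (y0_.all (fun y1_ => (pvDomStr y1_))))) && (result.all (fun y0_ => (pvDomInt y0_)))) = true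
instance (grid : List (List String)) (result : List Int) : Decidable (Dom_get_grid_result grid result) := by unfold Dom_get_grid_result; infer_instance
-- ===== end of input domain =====

-- B walks result back-to-front and overwrites unconditionally, guarding on the original
-- grid, instead of A's forward scan guarded on the mutating copy (objective: alternative).

-- ===== PORT A =====
def convert_int_to_pos (num : Int) (grid : List (List String)) : Int × Int :=
  -- num = abs(num) - 1; x = num // len(grid[0]); y = num % len(grid[0])
  -- len(grid[0]) raises IndexError on an empty grid (excluded by Pre_); port defaults to [].
  let num2 : Int := |num| - 1
  let x := PySem.Int.floordiv num2 (((PySem.List.pyGet? grid 0).getD []).length : Int)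
  let y := PySem.Int.mod num2 (((PySem.List.pyGet? grid 0).getD []).length : Int)
  (x, y)

-- deepcopy of an immutable List is the list itself; the in-place writes become pySetD.
-- pyGet? = none is Python's IndexError (excluded by Pre_); the port then leaves the grid as is.
def get_grid_result (grid : List (List String)) (result : List Int) : List (List String) :=
  result.foldl (fun new_grid num =>
    let temp := if num > 0 then "T" else "G"
    let xy := convert_int_to_pos num grid
    match PySem.List.pyGet? new_grid xy.1 with
    | none => new_grid
    | some row =>
      match PySem.List.pyGet? row xy.2 with
      | none => new_grid
      | some cell =>
        if cell = "_" then
          PySem.List.pySetD new_grid xy.1 (PySem.List.pySetD row xy.2 temp)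
        else new_grid) grid

-- ===== PORT B =====
-- reversed(result) loop; divmod(abs(num)-1, len(grid[0])) = (floordiv, mod);
-- len(grid[0]) on an empty grid (IndexError) and w = 0 (ZeroDivisionError) are excluded
-- by Pre_, as is any out-of-range index (pyGet? = none is the IndexError).
def get_grid_result_alt (grid : List (List String)) (result : List Int) : List (List String) :=
  result.reverse.foldl (fun new_grid num =>
    let w : Int := (((PySem.List.pyGet? grid 0).getD []).length : Int)
    let x := PySem.Int.floordiv (|num| - 1) w
    let y := PySem.Int.mod (|num| - 1) w
    match PySem.List.pyGet? grid x with
    | none => new_grid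
    | some row =>
      match PySem.List.pyGet? row y with
      | none => new_grid
      | some cell =>
        if cell = "_" then
          match PySem.List.pyGet? new_grid x with
          | none => new_grid
          | some nrow =>
            PySem.List.pySetD new_grid x (PySem.List.pySetD nrow y (if num > 0 then "T" else "G"))
        else new_grid) grid

-- ===== PRECONDITION & SPEC =====
-- Pre_ excludes exactly the inputs on which A raises: with a non-empty result, an empty grid
-- (IndexError on grid[0]) or empty first row (ZeroDivisionError), a computed row index x
-- out of range, or a column index y out of range of that row (IndexError).
def Pre_get_grid_result (grid : List (List String)) (result : List Int) : Prop :=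
  result = [] ∨
  (grid ≠ [] ∧ 0 < (grid.headD []).length ∧
   ∀ num ∈ result,
     PySem.Int.floordiv (|num| - 1) ((grid.headD []).length : Int) < (grid.length : Int) ∧
     PySem.Int.mod (|num| - 1) ((grid.headD []).length : Int) <
       (((PySem.List.pyGet? grid
            (PySem.Int.floordiv (|num| - 1) ((grid.headD []).length : Int))).getD []).length : Int))
instance (grid : List (List String)) (result : List Int) : Decidable (Pre_get_grid_result grid result) := by
  unfold Pre_get_grid_result; infer_instance

def pvWitness_get_grid_result : List (List String) × List Int := ([["_", "x"], ["G", "_"]], [2, -3])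

def Spec_get_grid_result (grid : List (List String)) (result : List Int) (out : List (List String)) : Prop := out = get_grid_result_alt grid result
instance (grid : List (List String)) (result : List Int) (out : List (List String)) : Decidable (Spec_get_grid_result grid result out) := by unfold Spec_get_grid_result; infer_instance

-- ===== CLAIM (what is proved, stated in full; the proofs are below) =====
def Claim_equal_get_grid_result : Prop := ∀ (grid : List (List String)) (result : List Int), Dom_get_grid_result grid result → Pre_get_grid_result grid result → Spec_get_grid_result grid result (get_grid_result grid result)

-- ===== LEMMAS AND PROOFS =====

-- proof-local names for the two loop bodies
def aStep (grid : List (List String)) (new_grid : List (List String)) (num : Int) : List (List String) :=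
  let temp := if num > 0 then "T" else "G"
  let xy := convert_int_to_pos num grid
  match PySem.List.pyGet? new_grid xy.1 with
  | none => new_grid
  | some row =>
    match PySem.List.pyGet? row xy.2 with
    | none => new_grid
    | some cell =>
      if cell = "_" then
        PySem.List.pySetD new_grid xy.1 (PySem.List.pySetD row xy.2 temp)
      else new_grid

def bStep (grid : List (List String)) (new_grid : List (List String)) (num : Int) : List (List String) :=
  let w : Int := (((PySem.List.pyGet? grid 0).getD []).length : Int)
  let x := PySem.Int.floordiv (|num| - 1) w
  let y := PySem.Int.mod (|num| - 1) w
  match PySem.List.pyGet? grid x with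
  | none => new_grid
  | some row =>
    match PySem.List.pyGet? row y with
    | none => new_grid
    | some cell =>
      if cell = "_" then
        match PySem.List.pyGet? new_grid x with
        | none => new_grid
        | some nrow =>
          PySem.List.pySetD new_grid x (PySem.List.pySetD nrow y (if num > 0 then "T" else "G"))
      else new_grid

-- the physical cell a hint addresses (row -1 is Python's wrap to the last row)
def tgtRow (grid : List (List String)) (num : Int) : Int :=
  let x := PySem.Int.floordiv (|num| - 1) ((grid.headD []).length : Int)
  if x < 0 then x + (grid.length : Int) else x
def tgtCol (grid : List (List String)) (num : Int) : Int :=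
  PySem.Int.mod (|num| - 1) ((grid.headD []).length : Int)
def hits (grid : List (List String)) (num : Int) (i j : Int) : Bool :=
  tgtRow grid num == i && tgtCol grid num == j
def letter (num : Int) : String := if num > 0 then "T" else "G"

-- pointwise description of the final grid: a '_' cell takes the letter of the FIRST hint
-- in q addressing it; any other cell keeps its original character
def specCell (grid : List (List String)) (q : List Int) (i j : Int) (c : String) : String :=
  if c = "_" then
    match q.find? (fun num => hits grid num i j) with
    | some m => letter m
    | none => c
  else c

def specRow (grid : List (List String)) (q : List Int) (i : Int) (row : List String) : List String :=
  (PySem.List.enumerate row).map (fun jc => specCell grid q i jc.1 jc.2)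

def specGrid (grid : List (List String)) (q : List Int) : List (List String) :=
  (PySem.List.enumerate grid).map (fun ir => specRow grid q ir.1 ir.2)

lemma letter_ne (num : Int) : letter num ≠ "_" := by
  unfold letter; split <;> decide

lemma length_specRow (grid : List (List String)) (q : List Int) (i : Int) (row : List String) :
    (specRow grid q i row).length = row.length := by
  simp [specRow, PySem.List.length_enumerate]

lemma getElem_specRow (grid : List (List String)) (q : List Int) (i : Int) (row : List String)
    (j : Nat) (hj : j < row.length) :
    (specRow grid q i row)[j]'(by rw [length_specRow]; exact hj) =
      specCell grid q i (j : Int) row[j] := by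
  simp [specRow, PySem.List.getElem_enumerate]

lemma length_specGrid (grid : List (List String)) (q : List Int) :
    (specGrid grid q).length = grid.length := by
  simp [specGrid, PySem.List.length_enumerate]

lemma getElem_specGrid (grid : List (List String)) (q : List Int)
    (i : Nat) (hi : i < grid.length) :
    (specGrid grid q)[i]'(by rw [length_specGrid]; exact hi) = specRow grid q (i : Int) grid[i] := by
  simp [specGrid, PySem.List.getElem_enumerate]

lemma specGrid_nil (grid : List (List String)) : specGrid grid [] = grid := by
  have hrow : ∀ (i : Int) (row : List String), specRow grid [] i row = row := by
    intro i row
    have h : (PySem.List.enumerate row).map (fun jc => specCell grid [] i jc.1 jc.2)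
        = (PySem.List.enumerate row).map (fun jc => jc.2) := by
      apply List.map_congr_left
      intro jc _
      simp [specCell]
    rw [specRow, h, PySem.List.map_snd_enumerate]
  have h2 : (PySem.List.enumerate grid).map (fun ir => specRow grid [] ir.1 ir.2)
      = (PySem.List.enumerate grid).map (fun ir => ir.2) := by
    apply List.map_congr_left
    intro ir _
    exact hrow ir.1 ir.2
  simpa [specGrid, PySem.List.map_snd_enumerate] using h2

-- a cell-wise equal description gives the same grid
lemma specGrid_congr (grid : List (List String)) (q q' : List Int)
    (H : ∀ (i : Nat) (hi : i < grid.length) (j : Nat) (hj : j < (grid[i]'hi).length),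
        specCell grid q' (i : Int) (j : Int) ((grid[i]'hi)[j]'hj)
          = specCell grid q (i : Int) (j : Int) ((grid[i]'hi)[j]'hj)) :
    specGrid grid q' = specGrid grid q := by
  apply List.ext_getElem (by simp [length_specGrid])
  intro i h1 h2
  have h1' : i < grid.length := by simpa [length_specGrid] using h1
  rw [getElem_specGrid grid q' i h1', getElem_specGrid grid q i h1']
  apply List.ext_getElem (by simp [length_specRow])
  intro j hj1 hj2
  have hj' : j < (grid[i]).length := by simpa [length_specRow] using hj1
  rw [getElem_specRow grid q' (i : Int) grid[i] j hj', getElem_specRow grid q (i : Int) grid[i] j hj']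
  exact H i h1' j hj'

-- a description whose find? changes only at one cell equals the old grid with that cell set
lemma specGrid_set (grid : List (List String)) (q q' : List Int)
    (xi : Nat) (hxi : xi < grid.length) (y : Int) (hy0 : 0 ≤ y)
    (hylen : y.toNat < (grid[xi]).length) (v : String)
    (hoff : ∀ i j : Int, ¬(i = (xi : Int) ∧ j = y) →
        q'.find? (fun n => hits grid n i j) = q.find? (fun n => hits grid n i j))
    (hon : specCell grid q' (xi : Int) y (grid[xi][y.toNat]) = v) :
    specGrid grid q'
      = (specGrid grid q).set xi ((specRow grid q (xi : Int) grid[xi]).set y.toNat v) := by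
  apply List.ext_getElem (by simp [length_specGrid])
  intro i h1 h2
  have h1' : i < grid.length := by simpa [length_specGrid] using h1
  rw [getElem_specGrid grid q' i h1', List.getElem_set]
  by_cases hi : xi = i
  · subst hi
    rw [if_pos rfl]
    apply List.ext_getElem (by simp [length_specRow])
    intro j hj1 hj2
    have hj' : j < (grid[xi]).length := by simpa [length_specRow] using hj1
    rw [getElem_specRow grid q' (xi : Int) grid[xi] j hj', List.getElem_set]
    by_cases hj : y.toNat = j
    · subst hj
      rw [if_pos rfl]
      have hyy : ((y.toNat : Int)) = y := Int.toNat_of_nonneg hy0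
      rw [hyy]; exact hon
    · rw [if_neg hj, getElem_specRow grid q (xi : Int) grid[xi] j hj']
      have hne : ¬(((xi : Int)) = (xi : Int) ∧ ((j : Int)) = y) := by
        rintro ⟨-, hjy⟩; exact hj (by omega)
      simp only [specCell, hoff _ _ hne]
  · rw [if_neg hi, getElem_specGrid grid q i h1']
    apply List.ext_getElem (by simp [length_specRow])
    intro j hj1 hj2
    have hj' : j < (grid[i]).length := by simpa [length_specRow] using hj1
    rw [getElem_specRow grid q' (i : Int) grid[i] j hj', getElem_specRow grid q (i : Int) grid[i] j hj']
    have hne : ¬(((i : Int)) = (xi : Int) ∧ ((j : Int)) = y) := by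
      rintro ⟨hiy, -⟩; exact hi (by omega)
    simp only [specCell, hoff _ _ hne]

lemma hits_iff (grid : List (List String)) (num : Int) (i j : Int) :
    hits grid num i j = true ↔ (i = tgtRow grid num ∧ j = tgtCol grid num) := by
  unfold hits
  rw [Bool.and_eq_true, beq_iff_eq, beq_iff_eq]
  constructor
  · rintro ⟨h1, h2⟩; exact ⟨h1.symm, h2.symm⟩
  · rintro ⟨h1, h2⟩; exact ⟨h1.symm, h2.symm⟩

-- a description whose find? changes nowhere relevantly leaves the grid unchanged
lemma specGrid_noop (grid : List (List String)) (q q' : List Int)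
    (xi : Nat) (hxi : xi < grid.length) (y : Int) (hy0 : 0 ≤ y)
    (hylen : y.toNat < (grid[xi]).length)
    (hoff : ∀ i j : Int, ¬(i = (xi : Int) ∧ j = y) →
        q'.find? (fun n => hits grid n i j) = q.find? (fun n => hits grid n i j))
    (hon : specCell grid q' (xi : Int) y (grid[xi][y.toNat])
        = specCell grid q (xi : Int) y (grid[xi][y.toNat])) :
    specGrid grid q' = specGrid grid q := by
  apply specGrid_congr
  intro i hi j hj
  by_cases hne : ((i : Int)) = (xi : Int) ∧ ((j : Int)) = y
  · have hieq : i = xi := by omega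
    subst hieq
    have hjeq : j = y.toNat := by omega
    subst hjeq
    have hyy : ((y.toNat : Int)) = y := Int.toNat_of_nonneg hy0
    rw [hyy]
    exact hon
  · simp only [specCell, hoff _ _ hne]

lemma pySetD_neg_one {α : Type} (l : List α) (v : α) (hl : l ≠ []) :
    PySem.List.pySetD l (-1) v = l.set (l.length - 1) v := by
  unfold PySem.List.pySetD PySem.List.pySet? PySem.List.pyIdx?
  have h0 : 0 < l.length := List.length_pos_iff.mpr hl
  split_ifs <;> simp_all

-- the geometric facts Pre_ yields for one hint num
lemma pos_facts (grid : List (List String)) (hg : grid ≠ [])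
    (hw : 0 < (grid.headD []).length) (num : Int)
    (hx : PySem.Int.floordiv (|num| - 1) ((grid.headD []).length : Int) < (grid.length : Int))
    (hy : PySem.Int.mod (|num| - 1) ((grid.headD []).length : Int) <
      (((PySem.List.pyGet? grid
          (PySem.Int.floordiv (|num| - 1) ((grid.headD []).length : Int))).getD []).length : Int)) :
    ∃ (xi : Nat) (hxi : xi < grid.length),
      tgtRow grid num = (xi : Int) ∧
      (PySem.Int.mod (|num| - 1) ((grid.headD []).length : Int)).toNat < (grid[xi]).length ∧
      (∀ l : List (List String), l.length = grid.length →
        PySem.List.pyGet? l (PySem.Int.floordiv (|num| - 1) ((grid.headD []).length : Int)) = l[xi]?) ∧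
      (∀ l : List (List String), l.length = grid.length → ∀ v,
        PySem.List.pySetD l (PySem.Int.floordiv (|num| - 1) ((grid.headD []).length : Int)) v = l.set xi v) := by
  set W : Int := ((grid.headD []).length : Int) with hW
  have hWpos : 0 < W := by rw [hW]; exact_mod_cast hw
  set p : Int := |num| - 1 with hp
  set x : Int := PySem.Int.floordiv p W with hxdef
  set y : Int := PySem.Int.mod p W with hydef
  have hy0 : 0 ≤ y := PySem.Int.mod_nonneg p hWpos
  have hyw : y < W := PySem.Int.mod_lt p hWpos
  have hsum : x * W + y = p := PySem.Int.floordiv_mul_add_mod p W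
  have hp1 : -1 ≤ p := by have := abs_nonneg num; omega
  have hhpos : 0 < grid.length := List.length_pos_iff.mpr hg
  have hhpos' : (0 : Int) < (grid.length : Int) := by exact_mod_cast hhpos
  have hxlow : -1 ≤ x := by nlinarith
  rcases (by omega : 0 ≤ x ∨ x = -1) with hx0 | hxneg
  · have hxi : x.toNat < grid.length := by omega
    refine ⟨x.toNat, hxi, ?_, ?_, ?_, ?_⟩
    · unfold tgtRow
      rw [← hW, ← hxdef, if_neg (by omega)]
      omega
    · rw [PySem.List.pyGet?_of_nonneg _ hx0, List.getElem?_eq_getElem hxi] at hy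
      simp only [Option.getD_some] at hy
      omega
    · intro l _
      exact PySem.List.pyGet?_of_nonneg l hx0
    · intro l _ v
      exact PySem.List.pySetD_of_nonneg l v hx0
  · have hxi : grid.length - 1 < grid.length := by omega
    refine ⟨grid.length - 1, hxi, ?_, ?_, ?_, ?_⟩
    · unfold tgtRow
      rw [← hW, ← hxdef, if_pos (by omega)]
      omega
    · rw [hxneg, PySem.List.pyGet?_neg_one, List.getLast?_eq_getElem?,
        List.getElem?_eq_getElem hxi] at hy
      simp only [Option.getD_some] at hy
      omega
    · intro l hl
      rw [hxneg, PySem.List.pyGet?_neg_one, List.getLast?_eq_getElem?, hl]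
    · intro l hl v
      rw [hxneg, pySetD_neg_one l v (by rw [← List.length_pos_iff, hl]; exact hhpos), hl]

-- one A-iteration on a described grid appends the hint to the description
lemma aStep_spec (grid : List (List String)) (hg : grid ≠ [])
    (hw : 0 < (grid.headD []).length) (num : Int)
    (hx : PySem.Int.floordiv (|num| - 1) ((grid.headD []).length : Int) < (grid.length : Int))
    (hy : PySem.Int.mod (|num| - 1) ((grid.headD []).length : Int) <
      (((PySem.List.pyGet? grid
          (PySem.Int.floordiv (|num| - 1) ((grid.headD []).length : Int))).getD []).length : Int))
    (q : List Int) :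
    aStep grid (specGrid grid q) num = specGrid grid (q ++ [num]) := by
  obtain ⟨xi, hxi, htr, hylen, hget, hset⟩ := pos_facts grid hg hw num hx hy
  set W : Int := ((grid.headD []).length : Int) with hW
  set x : Int := PySem.Int.floordiv (|num| - 1) W with hxdef
  set y : Int := PySem.Int.mod (|num| - 1) W with hydef
  have hy0 : 0 ≤ y := PySem.Int.mod_nonneg _ (by rw [hW]; exact_mod_cast hw)
  have hg0 : PySem.List.pyGet? grid 0 = some (grid.headD []) := by
    cases grid with
    | nil => exact absurd rfl hg
    | cons a t => simp
  have hconv : convert_int_to_pos num grid = (x, y) := by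
    simp only [convert_int_to_pos, hg0, Option.getD_some, hxdef, hydef, hW]
  have htc : tgtCol grid num = y := rfl
  have hRlen : (specGrid grid q).length = grid.length := length_specGrid grid q
  have hR : PySem.List.pyGet? (specGrid grid q) x = some (specRow grid q (xi : Int) grid[xi]) := by
    rw [hget _ hRlen, List.getElem?_eq_getElem (by rw [hRlen]; exact hxi),
      getElem_specGrid _ _ xi hxi]
  have hrlen : (specRow grid q (xi : Int) grid[xi]).length = (grid[xi]).length :=
    length_specRow _ _ _ _
  have hrow : PySem.List.pyGet? (specRow grid q (xi : Int) grid[xi]) y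
      = some ((specRow grid q (xi : Int) grid[xi])[y.toNat]'(by rw [hrlen]; exact hylen)) := by
    rw [PySem.List.pyGet?_of_nonneg _ hy0, List.getElem?_eq_getElem (by rw [hrlen]; exact hylen)]
  have hyy : ((y.toNat : Int)) = y := Int.toNat_of_nonneg hy0
  have hcell : (specRow grid q (xi : Int) grid[xi])[y.toNat]'(by rw [hrlen]; exact hylen)
      = specCell grid q (xi : Int) y (grid[xi][y.toNat]) := by
    rw [getElem_specRow _ _ _ _ y.toNat hylen, hyy]
  set c0 : String := grid[xi][y.toNat] with hc0
  have hhits_self : hits grid num (xi : Int) y = true := by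
    rw [hits_iff]; exact ⟨htr.symm, htc.symm⟩
  have hhits_off : ∀ i j : Int, ¬(i = (xi : Int) ∧ j = y) → hits grid num i j = false := by
    intro i j hne
    rcases Bool.eq_false_or_eq_true (hits grid num i j) with h | h
    · rw [hits_iff] at h
      exact absurd ⟨by rw [h.1, htr], by rw [h.2, htc]⟩ hne
    · exact h
  have hoff : ∀ i j : Int, ¬(i = (xi : Int) ∧ j = y) →
      (q ++ [num]).find? (fun n => hits grid n i j) = q.find? (fun n => hits grid n i j) := by
    intro i j hne
    rw [List.find?_append]
    cases hfq : q.find? (fun n => hits grid n i j) with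
    | some m => rfl
    | none => simp [List.find?, hhits_off i j hne]
  simp only [aStep, hconv, hR, hrow, hcell]
  by_cases h_ : c0 = "_"
  · cases hfq : q.find? (fun n => hits grid n (xi : Int) y) with
    | some m =>
      have : specCell grid q (xi : Int) y c0 = letter m := by
        simp [specCell, h_, hfq]
      rw [this, if_neg (letter_ne m)]
      symm
      apply specGrid_noop grid q (q ++ [num]) xi hxi y hy0 hylen hoff
      have hfind : (q ++ [num]).find? (fun n => hits grid n (xi : Int) y) = some m := by
        rw [List.find?_append, hfq]; rfl
      simp [specCell, ← hc0, h_, hfind, hfq]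
    | none =>
      have : specCell grid q (xi : Int) y c0 = "_" := by
        simp [specCell, h_, hfq]
      rw [this, if_pos rfl, hset _ hRlen, PySem.List.pySetD_of_nonneg _ _ hy0]
      symm
      apply specGrid_set grid q (q ++ [num]) xi hxi y hy0 hylen _ hoff
      have hfind : (q ++ [num]).find? (fun n => hits grid n (xi : Int) y) = some num := by
        rw [List.find?_append, hfq]
        simp [List.find?, hhits_self]
      simp [specCell, ← hc0, h_, hfind, letter]
  · have : specCell grid q (xi : Int) y c0 = c0 := by simp [specCell, h_]
    rw [this, if_neg h_]
    symm
    apply specGrid_noop grid q (q ++ [num]) xi hxi y hy0 hylen hoff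
    simp [specCell, ← hc0, h_]

-- one B-iteration on a described grid prepends the hint to the description
lemma bStep_spec (grid : List (List String)) (hg : grid ≠ [])
    (hw : 0 < (grid.headD []).length) (num : Int)
    (hx : PySem.Int.floordiv (|num| - 1) ((grid.headD []).length : Int) < (grid.length : Int))
    (hy : PySem.Int.mod (|num| - 1) ((grid.headD []).length : Int) <
      (((PySem.List.pyGet? grid
          (PySem.Int.floordiv (|num| - 1) ((grid.headD []).length : Int))).getD []).length : Int))
    (q : List Int) :
    bStep grid (specGrid grid q) num = specGrid grid (num :: q) := by
  obtain ⟨xi, hxi, htr, hylen, hget, hset⟩ := pos_facts grid hg hw num hx hy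
  set W : Int := ((grid.headD []).length : Int) with hW
  set x : Int := PySem.Int.floordiv (|num| - 1) W with hxdef
  set y : Int := PySem.Int.mod (|num| - 1) W with hydef
  have hy0 : 0 ≤ y := PySem.Int.mod_nonneg _ (by rw [hW]; exact_mod_cast hw)
  have hg0 : PySem.List.pyGet? grid 0 = some (grid.headD []) := by
    cases grid with
    | nil => exact absurd rfl hg
    | cons a t => simp
  have htc : tgtCol grid num = y := rfl
  have hG : PySem.List.pyGet? grid x = some grid[xi] := by
    rw [hget grid rfl, List.getElem?_eq_getElem hxi]
  have hgyrow : PySem.List.pyGet? grid[xi] y = some (grid[xi][y.toNat]) := by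
    rw [PySem.List.pyGet?_of_nonneg _ hy0, List.getElem?_eq_getElem hylen]
  have hRlen : (specGrid grid q).length = grid.length := length_specGrid grid q
  have hR : PySem.List.pyGet? (specGrid grid q) x = some (specRow grid q (xi : Int) grid[xi]) := by
    rw [hget _ hRlen, List.getElem?_eq_getElem (by rw [hRlen]; exact hxi),
      getElem_specGrid _ _ xi hxi]
  set c0 : String := grid[xi][y.toNat] with hc0
  have hhits_self : hits grid num (xi : Int) y = true := by
    rw [hits_iff]; exact ⟨htr.symm, htc.symm⟩
  have hhits_off : ∀ i j : Int, ¬(i = (xi : Int) ∧ j = y) → hits grid num i j = false := by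
    intro i j hne
    rcases Bool.eq_false_or_eq_true (hits grid num i j) with h | h
    · rw [hits_iff] at h
      exact absurd ⟨by rw [h.1, htr], by rw [h.2, htc]⟩ hne
    · exact h
  have hoff : ∀ i j : Int, ¬(i = (xi : Int) ∧ j = y) →
      (num :: q).find? (fun n => hits grid n i j) = q.find? (fun n => hits grid n i j) := by
    intro i j hne
    simp [List.find?, hhits_off i j hne]
  have hbody : bStep grid (specGrid grid q) num
      = (match PySem.List.pyGet? grid x with
        | none => specGrid grid q
        | some row =>
          match PySem.List.pyGet? row y with
          | none => specGrid grid q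
          | some cell =>
            if cell = "_" then
              match PySem.List.pyGet? (specGrid grid q) x with
              | none => specGrid grid q
              | some nrow =>
                PySem.List.pySetD (specGrid grid q) x
                  (PySem.List.pySetD nrow y (if num > 0 then "T" else "G"))
            else specGrid grid q) := by
    simp only [bStep, hg0, Option.getD_some, ← hW, ← hxdef, ← hydef]
  rw [hbody]
  simp only [hG, hgyrow]
  by_cases h_ : c0 = "_"
  · rw [if_pos h_]
    simp only [hR]
    rw [hset _ hRlen, PySem.List.pySetD_of_nonneg _ _ hy0]
    symm
    apply specGrid_set grid q (num :: q) xi hxi y hy0 hylen _ hoff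
    have hfind : (num :: q).find? (fun n => hits grid n (xi : Int) y) = some num := by
      simp [List.find?, hhits_self]
    simp [specCell, ← hc0, h_, hfind, letter]
  · rw [if_neg h_]
    symm
    apply specGrid_noop grid q (num :: q) xi hxi y hy0 hylen hoff
    simp [specCell, ← hc0, h_]

def okNum (grid : List (List String)) (num : Int) : Prop :=
  PySem.Int.floordiv (|num| - 1) ((grid.headD []).length : Int) < (grid.length : Int) ∧
  PySem.Int.mod (|num| - 1) ((grid.headD []).length : Int) <
    (((PySem.List.pyGet? grid
        (PySem.Int.floordiv (|num| - 1) ((grid.headD []).length : Int))).getD []).length : Int)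

lemma loopA (grid : List (List String)) (hg : grid ≠ [])
    (hw : 0 < (grid.headD []).length) (l : List Int)
    (hl : ∀ num ∈ l, okNum grid num) (q : List Int) :
    l.foldl (aStep grid) (specGrid grid q) = specGrid grid (q ++ l) := by
  induction l generalizing q with
  | nil => simp
  | cons num rest ih =>
    have h1 := hl num (by simp)
    simp only [List.foldl_cons]
    rw [aStep_spec grid hg hw num h1.1 h1.2 q]
    rw [ih (fun m hm => hl m (by simp [hm])) (q ++ [num])]
    simp

lemma loopB (grid : List (List String)) (hg : grid ≠ [])
    (hw : 0 < (grid.headD []).length) (l : List Int)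
    (hl : ∀ num ∈ l, okNum grid num) (q : List Int) :
    l.foldl (bStep grid) (specGrid grid q) = specGrid grid (l.reverse ++ q) := by
  induction l generalizing q with
  | nil => simp
  | cons num rest ih =>
    have h1 := hl num (by simp)
    simp only [List.foldl_cons]
    rw [bStep_spec grid hg hw num h1.1 h1.2 q]
    rw [ih (fun m hm => hl m (by simp [hm])) (num :: q)]
    simp

lemma A_unfold (grid : List (List String)) (result : List Int) :
    get_grid_result grid result = result.foldl (aStep grid) grid := rfl

lemma B_unfold (grid : List (List String)) (result : List Int) :
    get_grid_result_alt grid result = result.reverse.foldl (bStep grid) grid := rfl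

-- ===== VERDICT (by name: the statement is the Claim_ definition above) =====
theorem get_grid_result_spec : Claim_equal_get_grid_result := by
  intro grid result _ hpre
  unfold Spec_get_grid_result
  rcases hpre with hres | ⟨hg, hw, hnums⟩
  · subst hres; rfl
  · have hA := loopA grid hg hw result hnums []
    rw [specGrid_nil, List.nil_append] at hA
    have hB := loopB grid hg hw result.reverse (fun m hm => hnums m (by simpa using hm)) []
    rw [specGrid_nil, List.append_nil, List.reverse_reverse] at hB
    rw [A_unfold, B_unfold, hA, hB]
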